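-- pv_equiv track=rewrite | github.com/flaviolunaferreira/sd-06-restaurant-orders | src/utils/never_went.py | never_went
-- ===== SOURCE A (Python) =====
-- def never_went(name, orders):
--     days = set()
--     days_of_client = set()
--
--     for order in orders:
--         days.add(order[2])
--
--     for order in orders:
--         if order[0] == name:
--             days_of_client.add(order[2])
--
--     return days.difference(days_of_client)
-- ===== SOURCE B (Python) =====
-- def never_went(name, orders):
--     day_clients = {}
--     for order in orders:
--         day_clients.setdefault(order[2], set()).add(order[0])
--     return {day for day, clients in day_clients.items() if name not in clients}
-- ===== Notes on version B (the rewrite author's own statement) =====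
-- stated objective: alternative
-- what changed: One pass builds a dict mapping each day to the set of clients seen that day; absent days are then selected by membership in that per-day index, instead of A's two parallel day-sets combined with set.difference.
import Mathlib
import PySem

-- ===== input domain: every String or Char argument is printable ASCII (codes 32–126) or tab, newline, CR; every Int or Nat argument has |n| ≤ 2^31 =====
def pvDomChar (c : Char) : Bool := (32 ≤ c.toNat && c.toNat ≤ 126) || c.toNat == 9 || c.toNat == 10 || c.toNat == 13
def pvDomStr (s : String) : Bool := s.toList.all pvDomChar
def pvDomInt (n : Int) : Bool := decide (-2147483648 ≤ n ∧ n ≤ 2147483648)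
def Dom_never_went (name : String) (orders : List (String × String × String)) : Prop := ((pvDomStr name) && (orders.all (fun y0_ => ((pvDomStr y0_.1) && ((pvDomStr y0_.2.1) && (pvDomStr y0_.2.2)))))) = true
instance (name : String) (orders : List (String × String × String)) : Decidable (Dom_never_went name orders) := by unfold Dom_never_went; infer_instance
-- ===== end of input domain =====

-- B builds a per-day dict of attending clients in one pass and selects absent days by membership, instead of A's two day-sets and set.difference (same cost, different structure).


-- ===== PORT A =====
def never_went (name : String) (orders : List (String × String × String)) : List String :=
  let days : PySem.Set String :=
    orders.foldl (fun s order => PySem.Set.add s order.2.2) PySem.Set.empty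
  let days_of_client : PySem.Set String :=
    orders.foldl (fun s order => if order.1 == name then PySem.Set.add s order.2.2 else s)
      PySem.Set.empty
  PySem.Set.diff days days_of_client

-- ===== PORT B =====
def never_went_alt (name : String) (orders : List (String × String × String)) : List String :=
  let day_clients : PySem.Dict String (PySem.Set String) :=
    orders.foldl
      (fun d order => d.modify order.2.2 PySem.Set.empty (fun s => PySem.Set.add s order.1))
      PySem.Dict.empty
  PySem.Set.ofList
    ((day_clients.items.filter (fun p => !(PySem.Set.contains p.2 name))).map (fun p => p.1))

-- ===== PRECONDITION & SPEC =====
def Spec_never_went (name : String) (orders : List (String × String × String)) (out : List String) : Prop := out = never_went_alt name orders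
instance (name : String) (orders : List (String × String × String)) (out : List String) : Decidable (Spec_never_went name orders out) := by unfold Spec_never_went; infer_instance

-- ===== CLAIM (what is proved, stated in full; the proofs are below) =====
def Claim_equal_never_went : Prop := ∀ (name : String) (orders : List (String × String × String)), Dom_never_went name orders → Spec_never_went name orders (never_went name orders)

-- ===== LEMMAS AND PROOFS =====

-- membership in A's second loop (days of the named client)
theorem nw_mem_client_fold (name : String) (orders : List (String × String × String))
    (s : PySem.Set String) (x : String) :
    x ∈ orders.foldl
        (fun s order => if order.1 == name then PySem.Set.add s order.2.2 else s) s ↔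
      x ∈ s ∨ ∃ o ∈ orders, o.1 = name ∧ o.2.2 = x := by
  induction orders generalizing s with
  | nil => simp
  | cons o rest ih =>
    simp only [List.foldl_cons]
    by_cases h : o.1 = name
    · rw [if_pos (by simp [h]), ih]
      simp only [PySem.Set.mem_add, List.mem_cons]
      constructor
      · rintro ((h1 | h1) | ⟨p, hp, h1, h2⟩)
        · exact Or.inl h1
        · exact Or.inr ⟨o, Or.inl rfl, h, h1.symm⟩
        · exact Or.inr ⟨p, Or.inr hp, h1, h2⟩
      · rintro (h1 | ⟨p, hp | hp, h1, h2⟩)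
        · exact Or.inl (Or.inl h1)
        · exact Or.inl (Or.inr (hp ▸ h2).symm)
        · exact Or.inr ⟨p, hp, h1, h2⟩
    · rw [if_neg (by simp [h]), ih]
      simp only [List.mem_cons]
      constructor
      · rintro (h1 | ⟨p, hp, h1, h2⟩)
        · exact Or.inl h1
        · exact Or.inr ⟨p, Or.inr hp, h1, h2⟩
      · rintro (h1 | ⟨p, hp | hp, h1, h2⟩)
        · exact Or.inl h1
        · exact absurd (hp ▸ h1) h
        · exact Or.inr ⟨p, hp, h1, h2⟩

-- membership of `name` in B's per-day client set
theorem nw_mem_dict_fold (name : String) (orders : List (String × String × String))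
    (d : PySem.Dict String (PySem.Set String)) (k : String) :
    name ∈ (orders.foldl
        (fun d order => d.modify order.2.2 PySem.Set.empty (fun s => PySem.Set.add s order.1)) d
        ).getD k PySem.Set.empty ↔
      name ∈ d.getD k PySem.Set.empty ∨ ∃ o ∈ orders, o.1 = name ∧ o.2.2 = k := by
  induction orders generalizing d with
  | nil => simp
  | cons o rest ih =>
    simp only [List.foldl_cons, ih, PySem.Dict.getD_modify]
    by_cases h : k = o.2.2
    · subst h
      rw [if_pos rfl]
      simp only [PySem.Set.mem_add, List.mem_cons]
      constructor
      · rintro ((h1 | h1) | ⟨p, hp, h1, h2⟩)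
        · exact Or.inl h1
        · exact Or.inr ⟨o, Or.inl rfl, h1.symm, rfl⟩
        · exact Or.inr ⟨p, Or.inr hp, h1, h2⟩
      · rintro (h1 | ⟨p, hp | hp, h1, h2⟩)
        · exact Or.inl (Or.inl h1)
        · exact Or.inl (Or.inr (hp ▸ h1).symm)
        · exact Or.inr ⟨p, hp, h1, h2⟩
    · rw [if_neg h]
      simp only [List.mem_cons]
      constructor
      · rintro (h1 | ⟨p, hp, h1, h2⟩)
        · exact Or.inl h1
        · exact Or.inr ⟨p, Or.inr hp, h1, h2⟩
      · rintro (h1 | ⟨p, hp | hp, h1, h2⟩)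
        · exact Or.inl h1
        · exact absurd (hp ▸ h2).symm h
        · exact Or.inr ⟨p, hp, h1, h2⟩

theorem nw_main (name : String) (orders : List (String × String × String)) :
    never_went name orders = never_went_alt name orders := by
  simp only [never_went, never_went_alt]
  have hdays : orders.foldl (fun s order => PySem.Set.add s order.2.2) PySem.Set.empty =
      PySem.Set.ofList (orders.map (fun o => o.2.2)) := by
    rw [← PySem.Set.update_map_eq_foldl_add, PySem.Set.update_empty]
  have hkeys : (orders.foldl (fun d order => PySem.Dict.modify d order.2.2 PySem.Set.empty
        (fun s => PySem.Set.add s order.1)) PySem.Dict.empty).keys =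
      PySem.Set.ofList (orders.map (fun o => o.2.2)) := by
    rw [PySem.Dict.keys_foldl_modify_key orders (fun o => o.2.2) PySem.Set.empty
      (fun _ o => (fun s => PySem.Set.add s o.1)) PySem.Dict.empty]
    simp [PySem.Set.update_nil_left, PySem.Dict.keys_empty]
  have hnodup : (orders.foldl (fun d order => PySem.Dict.modify d order.2.2 PySem.Set.empty
        (fun s => PySem.Set.add s order.1)) PySem.Dict.empty).keys.Nodup := by
    rw [hkeys]; exact PySem.Set.nodup_ofList _
  rw [PySem.Dict.items_eq_map_keys _ hnodup PySem.Set.empty, hkeys, hdays,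
    List.filter_map, List.map_map]
  have hcomp : (fun p : String × PySem.Set String => p.1) ∘
      (fun k => (k, (orders.foldl (fun d order => PySem.Dict.modify d order.2.2 PySem.Set.empty
        (fun s => PySem.Set.add s order.1)) PySem.Dict.empty).getD k PySem.Set.empty)) = id := rfl
  rw [hcomp, List.map_id]
  have hfc : ∀ k ∈ PySem.Set.ofList (orders.map (fun o => o.2.2)),
      ((fun p : String × PySem.Set String => !(PySem.Set.contains p.2 name)) ∘
        (fun k => (k, (orders.foldl (fun d order => PySem.Dict.modify d order.2.2 PySem.Set.empty
          (fun s => PySem.Set.add s order.1)) PySem.Dict.empty).getD k PySem.Set.empty))) k =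
      (fun x => !(PySem.Set.contains
        (orders.foldl (fun s order => if order.1 == name then PySem.Set.add s order.2.2 else s)
          PySem.Set.empty) x)) k := by
    intro k _
    simp only [Function.comp]
    congr 1
    rw [Bool.eq_iff_iff, PySem.Set.contains_iff, PySem.Set.contains_iff,
      nw_mem_dict_fold, nw_mem_client_fold]
    simp [PySem.Dict.getD_empty, PySem.Set.empty]
  rw [List.filter_congr hfc]
  have hdiff : ∀ (s t : PySem.Set String), PySem.Set.diff s t =
      s.filter (fun x => !(PySem.Set.contains t x)) := fun _ _ => rfl
  rw [hdiff, PySem.Set.ofList_eq_self_of_nodup _ ((PySem.Set.nodup_ofList _).filter _)]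

-- ===== VERDICT (by name: the statement is the Claim_ definition above) =====
theorem never_went_spec : Claim_equal_never_went := by
  intro name orders _
  unfold Spec_never_went
  exact nw_main name orders
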